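-- pv_equiv track=rewrite | github.com/ceblab/bacon | bayes.py | making_d_star
-- ===== SOURCE A (Python) =====
-- def making_d_star(U_set,num_vari,child_vari):
--     d_ij =[0 for i in range(num_vari)]
--     for i in range(num_vari):
--         if child_vari == i:
--             d_ij[i] = (-1,)
--         else:
--             p_list = list()
--             for j in range(len(U_set)):
--                 set1 = {k for k in U_set[j]}
--                 if(i in set1):
--                     p_list.append(j)
--             d_ij[i]=tuple(p_list)
--     return d_ij
-- ===== SOURCE B (Python) =====
-- def making_d_star(U_set, num_vari, child_vari):
--     idx = {}
--     for j, row in enumerate(U_set):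
--         for k in set(row):
--             idx.setdefault(k, []).append(j)
--     return [(-1,) if i == child_vari else tuple(idx.get(i, ()))
--             for i in range(num_vari)]
-- ===== Notes on version B (the rewrite author's own statement) =====
-- stated objective: faster
-- what changed: B inverts U_set once into an element->indices dictionary (one pass over all set elements) and then answers each variable by a single lookup, instead of A's rescan of every U_set entry for every variable.
import Mathlib
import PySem

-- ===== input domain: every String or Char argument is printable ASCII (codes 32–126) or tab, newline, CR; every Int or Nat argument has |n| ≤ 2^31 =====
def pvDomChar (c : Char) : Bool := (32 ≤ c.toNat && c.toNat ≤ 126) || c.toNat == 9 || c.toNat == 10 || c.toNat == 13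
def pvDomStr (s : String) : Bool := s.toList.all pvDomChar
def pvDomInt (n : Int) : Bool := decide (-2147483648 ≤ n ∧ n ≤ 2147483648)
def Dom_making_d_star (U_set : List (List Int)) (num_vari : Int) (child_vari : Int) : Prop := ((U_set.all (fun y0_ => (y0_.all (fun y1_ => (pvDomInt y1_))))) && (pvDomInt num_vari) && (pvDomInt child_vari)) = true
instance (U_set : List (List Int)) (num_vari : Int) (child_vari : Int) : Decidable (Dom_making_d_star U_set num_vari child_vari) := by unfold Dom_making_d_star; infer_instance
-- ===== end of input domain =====

-- B replaces A's per-variable rescan of U_set by a single inversion pass (element -> list of indices), one lookup per variable (objective: faster).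

-- ===== PORT A =====
-- Python's `d_ij = [0 for i in range(num_vari)]` holds int placeholders that are all overwritten
-- (the assignment loop runs over the same range), so we initialise with [] of the result type;
-- the index i of `d_ij[i] = ...` always comes from range(num_vari) = range of valid indices, so List.set is exact here.
def making_d_star (U_set : List (List Int)) (num_vari : Int) (child_vari : Int) : List (List Int) :=
  let d_ij : List (List Int) := (PySem.List.pyRange 0 num_vari 1).map (fun _ => [])
  (PySem.List.pyRange 0 num_vari 1).foldl
    (fun d_ij i =>
      if child_vari == i then
        d_ij.set i.toNat [-1]
      else
        let p_list : List Int :=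
          (PySem.List.pyRange 0 (U_set.length : Int) 1).foldl
            (fun p_list j =>
              let set1 := PySem.Set.ofList (PySem.List.pyGetD U_set j [])
              if i ∈ set1 then p_list ++ [j] else p_list)
            []
        d_ij.set i.toNat p_list)
    d_ij

-- ===== PORT B =====
-- `idx.setdefault(k, []).append(j)` is exactly `Dict.modify k [] (· ++ [j])` (insert [] at the end if absent, then append).
def making_d_star_alt (U_set : List (List Int)) (num_vari : Int) (child_vari : Int) : List (List Int) :=
  let idx : PySem.Dict Int (List Int) :=
    (PySem.List.enumerate U_set).foldl
      (fun idx jr =>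
        (PySem.Set.ofList jr.2).foldl
          (fun idx k => idx.modify k [] (fun v => v ++ [jr.1]))
          idx)
      PySem.Dict.empty
  (PySem.List.pyRange 0 num_vari 1).map
    (fun i => if i == child_vari then [-1] else idx.getD i [])

-- ===== PRECONDITION & SPEC =====
def Spec_making_d_star (U_set : List (List Int)) (num_vari : Int) (child_vari : Int) (out : List (List Int)) : Prop := out = making_d_star_alt U_set num_vari child_vari
instance (U_set : List (List Int)) (num_vari : Int) (child_vari : Int) (out : List (List Int)) : Decidable (Spec_making_d_star U_set num_vari child_vari out) := by unfold Spec_making_d_star; infer_instance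

-- ===== CLAIM (what is proved, stated in full; the proofs are below) =====
def Claim_equal_making_d_star : Prop := ∀ (U_set : List (List Int)) (num_vari : Int) (child_vari : Int), Dom_making_d_star U_set num_vari child_vari → Spec_making_d_star U_set num_vari child_vari (making_d_star U_set num_vari child_vari)

-- ===== LEMMAS AND PROOFS =====

-- the common value: for each variable i, the indices j (in order) with i ∈ U_set[j]
def occ (U_set : List (List Int)) (i : Int) : List Int :=
  (PySem.List.pyRange 0 (U_set.length : Int) 1).flatMap
    (fun j => if i ∈ PySem.List.pyGetD U_set j [] then [j] else [])

-- A's inner loop over U_set, as in the port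
def innerA (U_set : List (List Int)) (i : Int) : List Int :=
  (PySem.List.pyRange 0 (U_set.length : Int) 1).foldl
    (fun p_list j =>
      let set1 := PySem.Set.ofList (PySem.List.pyGetD U_set j [])
      if i ∈ set1 then p_list ++ [j] else p_list)
    []

-- B's inverted index, as in the port
def idxB (U_set : List (List Int)) : PySem.Dict Int (List Int) :=
  (PySem.List.enumerate U_set).foldl
    (fun idx jr =>
      (PySem.Set.ofList jr.2).foldl
        (fun idx k => idx.modify k [] (fun v => v ++ [jr.1]))
        idx)
    PySem.Dict.empty

lemma filter_eq_flatMap {α : Type} (l : List α) (p : α → Bool) :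
    l.filter p = l.flatMap (fun x => if p x then [x] else []) := by
  induction l with
  | nil => rfl
  | cons a t ih => by_cases h : p a <;> simp [h, ih]

lemma innerA_eq_occ (U_set : List (List Int)) (i : Int) : innerA U_set i = occ U_set i := by
  unfold innerA occ
  rw [PySem.List.foldl_append_ite_eq_filter
    (fun j => i ∈ PySem.Set.ofList (PySem.List.pyGetD U_set j []))]
  rw [List.nil_append, filter_eq_flatMap]
  apply List.flatMap_congr
  intro j _
  by_cases h : i ∈ PySem.List.pyGetD U_set j [] <;>
    simp [PySem.Set.mem_ofList, h]

lemma idxB_getD (U_set : List (List Int)) (i : Int) : (idxB U_set).getD i [] = occ U_set i := by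
  unfold idxB
  have hfold :
      (PySem.List.enumerate U_set).foldl
        (fun idx jr =>
          (PySem.Set.ofList jr.2).foldl
            (fun idx k => idx.modify k [] (fun v => v ++ [jr.1])) idx)
        PySem.Dict.empty
      = ((PySem.List.enumerate U_set).flatMap
          (fun jr => (PySem.Set.ofList jr.2).map (fun k => (k, jr.1)))).foldl
          (fun d p => d.modify p.1 [] (fun v => v ++ [p.2])) PySem.Dict.empty := by
    rw [List.foldl_flatMap]
    apply PySem.List.foldl_congr_mem
    intro acc jr _
    rw [List.foldl_map]
  rw [hfold, PySem.Dict.getD_foldl_modify_append, PySem.Dict.getD_empty, List.nil_append]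
  rw [List.filter_flatMap, List.map_flatMap]
  have hchunk : ∀ jr : Int × List Int,
      (((PySem.Set.ofList jr.2).map (fun k => (k, jr.1))).filter
          (fun p => p.1 == i)).map (fun x => x.2)
        = if i ∈ jr.2 then [jr.1] else [] := by
    intro jr
    rw [List.filter_map]
    have : ((fun p : Int × Int => p.1 == i) ∘ fun k => (k, jr.1)) = (fun k => k == i) := rfl
    rw [this, List.filter_beq]
    by_cases h : i ∈ jr.2
    · have hm : i ∈ PySem.Set.ofList jr.2 := (PySem.Set.mem_ofList _ _).mpr h
      rw [List.count_eq_one_of_mem (PySem.Set.nodup_ofList _) hm]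
      simp [h]
    · have hm : i ∉ PySem.Set.ofList jr.2 := fun hc => h ((PySem.Set.mem_ofList _ _).mp hc)
      rw [List.count_eq_zero_of_not_mem hm]
      simp [h]
  calc ((PySem.List.enumerate U_set).flatMap fun jr =>
          ((((PySem.Set.ofList jr.2).map (fun k => (k, jr.1))).filter
            (fun p => p.1 == i)).map (fun x => x.2)))
      = (PySem.List.enumerate U_set).flatMap (fun jr => if i ∈ jr.2 then [jr.1] else []) := by
        apply List.flatMap_congr; intro jr _; exact hchunk jr
    _ = occ U_set i := by
        rw [PySem.List.enumerate_eq_map_pyRange U_set ([] : List Int), List.flatMap_map]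
        rfl

-- filling each cell of a list over range(n) is a map
lemma fold_set_range (f : Int → List Int) (n : Nat) :
    ∀ init : List (List Int), n ≤ init.length →
      (PySem.List.pyRange 0 (n : Int) 1).foldl (fun d i => d.set i.toNat (f i)) init
        = (PySem.List.pyRange 0 (n : Int) 1).map f ++ init.drop n := by
  induction n with
  | zero => intro init _; simp
  | succ n ih =>
    intro init hlen
    have hcast : ((n + 1 : Nat) : Int) = (n : Int) + 1 := by push_cast; ring
    rw [hcast, PySem.List.pyRange_one_succ_right (by exact_mod_cast Nat.zero_le n)]
    rw [List.foldl_append, List.map_append, ih init (by omega)]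
    have hlenmap : ((PySem.List.pyRange 0 (n : Int) 1).map f).length = n := by
      rw [PySem.List.pyRange_zero_natCast]
      simp
    have hdrop : init.drop n = init[n] :: init.drop (n + 1) :=
      List.drop_eq_getElem_cons (by omega)
    simp only [List.foldl_cons, List.foldl_nil, Int.toNat_natCast, List.set_append, hlenmap,
      lt_irrefl, if_false, Nat.sub_self, hdrop, List.set_cons_zero, List.map_cons, List.map_nil]
    simp

lemma entry_eq (U_set : List (List Int)) (child_vari i : Int) :
    (if child_vari == i then [(-1 : Int)] else innerA U_set i)
      = (if i == child_vari then [(-1 : Int)] else (idxB U_set).getD i []) := by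
  by_cases h : child_vari = i
  · simp [h]
  · have h' : ¬ i = child_vari := fun hc => h hc.symm
    simp only [beq_iff_eq, h, h', if_false]
    rw [innerA_eq_occ, idxB_getD]

-- ===== VERDICT (by name: the statement is the Claim_ definition above) =====
theorem making_d_star_spec : Claim_equal_making_d_star := by
  intro U_set num_vari child_vari _
  unfold Spec_making_d_star making_d_star making_d_star_alt
  have hrange : PySem.List.pyRange 0 num_vari 1 = PySem.List.pyRange 0 ((num_vari.toNat : Nat) : Int) 1 := by
    rcases le_or_gt num_vari 0 with h | h
    · rw [PySem.List.pyRange_one_eq_nil h, PySem.List.pyRange_one_eq_nil (by omega)]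
    · rw [Int.toNat_of_nonneg (le_of_lt h)]
  rw [hrange]
  have hbody :
      (PySem.List.pyRange 0 ((num_vari.toNat : Nat) : Int) 1).foldl
        (fun d_ij i =>
          if child_vari == i then d_ij.set i.toNat [-1]
          else
            let p_list : List Int :=
              (PySem.List.pyRange 0 (U_set.length : Int) 1).foldl
                (fun p_list j =>
                  let set1 := PySem.Set.ofList (PySem.List.pyGetD U_set j [])
                  if i ∈ set1 then p_list ++ [j] else p_list)
                []
            d_ij.set i.toNat p_list)
        ((PySem.List.pyRange 0 ((num_vari.toNat : Nat) : Int) 1).map (fun _ => []))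
      = (PySem.List.pyRange 0 ((num_vari.toNat : Nat) : Int) 1).foldl
          (fun d_ij i => d_ij.set i.toNat (if child_vari == i then [-1] else innerA U_set i))
          ((PySem.List.pyRange 0 ((num_vari.toNat : Nat) : Int) 1).map (fun _ => [])) := by
    apply PySem.List.foldl_congr_mem
    intro acc i _
    by_cases h : child_vari == i <;> simp [h, innerA]
  rw [hbody, fold_set_range _ num_vari.toNat _ (by
    rw [PySem.List.pyRange_zero_natCast]; simp)]
  have hdropnil :
      ((PySem.List.pyRange 0 ((num_vari.toNat : Nat) : Int) 1).map
        (fun _ => ([] : List Int))).drop num_vari.toNat = [] := by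
    apply List.drop_eq_nil_of_le
    rw [PySem.List.pyRange_zero_natCast]; simp
  rw [hdropnil, List.append_nil]
  exact List.map_congr_left (fun i _ => entry_eq U_set child_vari i)
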